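-- pv_equiv track=rewrite | github.com/kenyo3026/leetcode-practice | 1861-rotating-the-box/1861-rotating-the-box.py | rotateTheBox
-- ===== SOURCE A (Python) =====
-- from typing import List
--
-- def rotateTheBox(boxGrid: List[List[str]]) -> List[List[str]]:
--     n, m = len(boxGrid), len(boxGrid[0])
--
--     # stage 1: move stones to the right
--     for row in range(n):
--         empty = m - 1
--
--         for j in range(m-1, -1, -1):
--             if boxGrid[row][j] == '.':
--                 continue
--             elif boxGrid[row][j] == '#':
--                 if j != empty:
--                     boxGrid[row][empty] = '#'
--                     boxGrid[row][j] = '.'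
--                 empty -= 1
--             elif boxGrid[row][j] == '*':
--                 empty = j - 1
--
--     # stage 2: rotate 90 degrees clockwise
--     return list(zip(*boxGrid[::-1]))
-- ===== SOURCE B (Python) =====
-- from typing import List
--
-- def rotateTheBox(boxGrid: List[List[str]]) -> List[List[str]]:
--     m = len(boxGrid[0])
--
--     def flush(chunk):
--         k = chunk.count('#')
--         return ['.' if c == '#' else c for c in chunk[:len(chunk) - k]] + ['#'] * k
--
--     def fall(row):
--         out, chunk = [], []
--         for c in row:
--             if c == '*':
--                 out.extend(flush(chunk))
--                 out.append('*')
--                 chunk = []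
--             else:
--                 chunk.append(c)
--         return out + flush(chunk)
--
--     newGrid = [fall(row[:m]) for row in boxGrid]
--     return list(zip(*newGrid[::-1]))
-- ===== Notes on version B (the rewrite author's own statement) =====
-- stated objective: alternative
-- what changed: A simulates gravity in place with a right-to-left free-slot pointer per row; B rebuilds each row functionally by splitting the m-wide row into maximal chunks between '*' walls and re-emitting each chunk as its non-stone cells followed by its counted stones, then applies the same zip-based clockwise rotation.
import Mathlib
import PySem

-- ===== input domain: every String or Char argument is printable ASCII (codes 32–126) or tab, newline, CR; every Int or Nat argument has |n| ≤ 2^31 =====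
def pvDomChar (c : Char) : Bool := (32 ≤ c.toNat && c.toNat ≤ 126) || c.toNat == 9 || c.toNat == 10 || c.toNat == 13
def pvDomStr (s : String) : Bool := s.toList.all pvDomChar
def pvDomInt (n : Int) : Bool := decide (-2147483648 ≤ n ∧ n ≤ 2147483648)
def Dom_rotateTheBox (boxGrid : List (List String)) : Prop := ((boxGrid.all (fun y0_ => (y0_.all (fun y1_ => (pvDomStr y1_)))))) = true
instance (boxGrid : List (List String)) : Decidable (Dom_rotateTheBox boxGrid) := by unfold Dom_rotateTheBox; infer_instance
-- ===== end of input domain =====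

-- B replaces A's in-place right-to-left free-slot-pointer sweep by a per-row segment rebuild
-- (each maximal chunk between '*' walls is re-emitted as its non-stone cells followed by its
-- stones), then the same clockwise rotation. Equivalence is about the RETURN value only:
-- Python A mutates boxGrid in place, B does not.

-- shared helper: list(zip(*rows)) — transpose truncated to the shortest row (both Pythons
-- call the zip builtin on the reversed rows)
def pvZipStar (rows : List (List String)) : List (List String) :=
  match rows with
  | [] => []
  | r :: rs =>
    let k := rs.foldl (fun a t => min a t.length) r.length
    (List.range k).map (fun i => (r :: rs).map (fun row => row.getD i ""))

-- ===== PORT A =====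
-- one step of A's inner loop: state (row, empty), index j
def pvStepA (st : List String × Int) (j : Int) : List String × Int :=
  let c := PySem.List.pyGetD st.1 j ""
  if c = "." then st
  else if c = "#" then
    if j ≠ st.2 then ((PySem.List.pySetD (PySem.List.pySetD st.1 st.2 "#") j "."), st.2 - 1)
    else (st.1, st.2 - 1)
  else if c = "*" then (st.1, j - 1)
  else st

def rotateTheBox (boxGrid : List (List String)) : List (List String) :=
  let n : Int := boxGrid.length
  let m : Int := (boxGrid.headD []).length
  let g := (PySem.List.pyRange 0 n 1).foldl
    (fun g row => PySem.List.pySetD g row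
      (((PySem.List.pyRange (m-1) (-1) (-1)).foldl pvStepA (PySem.List.pyGetD g row [], m-1)).1))
    boxGrid
  pvZipStar g.reverse

-- ===== PORT B =====
def pvTrans (c : String) : String := if c = "#" then "." else c

def pvFlush (chunk : List String) : List String :=
  let k := chunk.count "#"
  (chunk.take (chunk.length - k)).map pvTrans ++ List.replicate k "#"

def pvStepB (acc : List String × List String) (c : String) : List String × List String :=
  if c = "*" then (acc.1 ++ pvFlush acc.2 ++ ["*"], []) else (acc.1, acc.2 ++ [c])

def pvFall (row : List String) : List String :=
  let p := row.foldl pvStepB ([], [])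
  p.1 ++ pvFlush p.2

def rotateTheBox_alt (boxGrid : List (List String)) : List (List String) :=
  pvZipStar ((boxGrid.map (fun r => pvFall (r.take (boxGrid.headD []).length))).reverse)

-- ===== PRECONDITION & SPEC =====
-- Pre_ excludes exactly the inputs on which A raises IndexError: the empty grid
-- (len(boxGrid[0])) and grids with a row shorter than the first row's width.
def Pre_rotateTheBox (boxGrid : List (List String)) : Prop :=
  boxGrid ≠ [] ∧ ∀ r ∈ boxGrid, (boxGrid.headD []).length ≤ r.length
instance (boxGrid : List (List String)) : Decidable (Pre_rotateTheBox boxGrid) := by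
  unfold Pre_rotateTheBox; infer_instance

def pvWitness_rotateTheBox : List (List String) :=
  [["#", ".", "*", "."], [".", "#", "#", "."]]

def Spec_rotateTheBox (boxGrid : List (List String)) (out : List (List String)) : Prop :=
  out = rotateTheBox_alt boxGrid
instance (boxGrid : List (List String)) (out : List (List String)) :
    Decidable (Spec_rotateTheBox boxGrid out) := by unfold Spec_rotateTheBox; infer_instance

-- ===== CLAIM (what is proved, stated in full; the proofs are below) =====
def Claim_equal_rotateTheBox : Prop := ∀ (boxGrid : List (List String)),
  Dom_rotateTheBox boxGrid → Pre_rotateTheBox boxGrid →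
  Spec_rotateTheBox boxGrid (rotateTheBox boxGrid)

-- ===== LEMMAS AND PROOFS =====

-- functional reformulation of A's inner loop: process the reversed row, carrying the
-- already-built suffix t and the distance d = empty - j
def pvFinA : List String → List String → Nat → List String
  | [], t, _ => t
  | c :: cs, t, d =>
    if c = "#" then
      (if d = 0 then pvFinA cs ("#" :: t) 0 else pvFinA cs ("." :: t.set (d-1) "#") d)
    else if c = "*" then pvFinA cs (c :: t) 0
    else pvFinA cs (c :: t) (d+1)

theorem pv_getD_append_len (a b : List String) (d : String) :
    (a ++ b).getD a.length d = b.getD 0 d := by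
  induction a with
  | nil => rfl
  | cons x xs ih => simpa using ih

theorem pv_set_append_len (a b : List String) (i : Nat) (v : String) :
    (a ++ b).set (a.length + i) v = a ++ b.set i v := by
  induction a with
  | nil => simp
  | cons x xs ih =>
    have h : (x :: xs).length + i = (xs.length + i) + 1 := by simp; omega
    rw [List.cons_append, h, List.set_cons_succ, ih, List.cons_append]

theorem pv_set_append_left (a : List String) : ∀ (b : List String) (i : Nat) (v : String),
    i < a.length → (a ++ b).set i v = a.set i v ++ b := by
  induction a with
  | nil => intro b i v h; simp at h
  | cons x xs ih =>
    intro b i v h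
    cases i with
    | zero => simp
    | succ n =>
      rw [List.cons_append, List.set_cons_succ, List.set_cons_succ,
        ih b n v (by simp at h; omega), List.cons_append]

theorem pv_set_last (a : List String) (h : a ≠ []) (v : String) :
    a.set (a.length - 1) v = a.dropLast ++ [v] := by
  induction a with
  | nil => exact absurd rfl h
  | cons x xs ih =>
    cases xs with
    | nil => simp
    | cons y ys =>
      have h2 : (x::y::ys).length - 1 = ((y::ys).length - 1) + 1 := by simp
      rw [h2, List.set_cons_succ, ih (by simp)]
      simp

theorem pv_foldA_finA (l : List String) : ∀ (t : List String) (d : Nat), d ≤ t.length →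
    ((PySem.List.pyRange ((l.length : Int) - 1) (-1) (-1)).foldl pvStepA
        (l.reverse ++ t, (l.length : Int) - 1 + d)).1 = pvFinA l t d := by
  induction l with
  | nil =>
    intro t d _
    rw [PySem.List.pyRange_neg_one_eq_nil (by simp)]
    simp [pvFinA]
  | cons c cs ih =>
    intro t d hd
    have hlen : ((c :: cs).length : Int) - 1 = (cs.length : Int) := by simp
    rw [hlen, PySem.List.pyRange_neg_one_cons (by omega), List.foldl_cons]
    have hrow : (c :: cs).reverse ++ t = cs.reverse ++ (c :: t) := by simp
    rw [hrow]
    have hget : PySem.List.pyGetD (cs.reverse ++ (c :: t)) ((cs.length : Int)) "" = c := by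
      have h1 : ((cs.length : Nat) : Int) = ((cs.reverse.length : Nat) : Int) := by simp
      rw [h1, PySem.List.pyGetD_natCast, pv_getD_append_len]
      rfl
    by_cases hh : c = "#"
    · subst hh
      by_cases hd0 : d = 0
      · have hstep : pvStepA (cs.reverse ++ ("#" :: t), (cs.length : Int) + (d:Int)) ((cs.length : Int))
            = (cs.reverse ++ ("#" :: t), (cs.length : Int) - 1 + ((0:Nat) : Int)) := by
          subst hd0
          simp only [pvStepA, hget]
          simp
        rw [hstep, ih ("#" :: t) 0 (by simp)]
        simp [pvFinA, hd0]
      · have hne : (↑cs.length : Int) ≠ ↑cs.length + ↑d := by omega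
        have e1 : PySem.List.pySetD (cs.reverse ++ ("#" :: t)) ((cs.length : Int) + d) "#"
            = cs.reverse ++ ("#" :: t.set (d-1) "#") := by
          have h2 : ((cs.length : Int) + d) = ((cs.reverse.length + d : Nat) : Int) := by
            push_cast [List.length_reverse]; ring
          rw [h2, PySem.List.pySetD_natCast, pv_set_append_len]
          congr 1
          obtain ⟨d', rfl⟩ : ∃ d', d = d' + 1 := ⟨d - 1, by omega⟩
          simp
        have e2 : PySem.List.pySetD (cs.reverse ++ ("#" :: t.set (d-1) "#")) ((cs.length : Int)) "."
            = cs.reverse ++ ("." :: t.set (d-1) "#") := by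
          have h2 : ((cs.length : Nat) : Int) = ((cs.reverse.length + 0 : Nat) : Int) := by simp
          rw [h2, PySem.List.pySetD_natCast, pv_set_append_len]
          rfl
        have hstep : pvStepA (cs.reverse ++ ("#" :: t), (cs.length : Int) + (d:Int)) ((cs.length : Int))
            = (cs.reverse ++ ("." :: t.set (d-1) "#"), (cs.length : Int) - 1 + d) := by
          simp only [pvStepA, hget]
          simp only [e1, e2, hne, if_true, ne_eq, not_false_iff]
          simp
          ring
        rw [hstep, ih ("." :: t.set (d-1) "#") d (by simp; omega)]
        simp [pvFinA, hd0]
    · by_cases hs : c = "*"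
      · subst hs
        have hstep : pvStepA (cs.reverse ++ ("*" :: t), (cs.length : Int) + (d:Int)) ((cs.length : Int))
            = (cs.reverse ++ ("*" :: t), (cs.length : Int) - 1 + ((0:Nat) : Int)) := by
          simp only [pvStepA, hget]
          simp
        rw [hstep, ih ("*" :: t) 0 (by simp)]
        simp [pvFinA]
      · have hstep : pvStepA (cs.reverse ++ (c :: t), (cs.length : Int) + (d:Int)) ((cs.length : Int))
            = (cs.reverse ++ (c :: t), (cs.length : Int) - 1 + ((d+1 : Nat) : Int)) := by
          simp only [pvStepA, hget]
          rw [if_neg hh, if_neg hs]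
          have h3 : ((cs.length : Int) + d) = ((cs.length : Int) - 1 + ((d+1:Nat):Int)) := by push_cast; ring
          split
          · exact Prod.ext rfl h3
          · exact Prod.ext rfl h3
        rw [hstep, ih (c :: t) (d+1) (by simp; omega)]
        simp [pvFinA, hh, hs]

theorem pv_seg (u : List String) (hu : "*" ∉ u) : ∀ (l' a q : List String) (s : Nat),
    pvFinA (u ++ l') (a ++ List.replicate s "#" ++ q) a.length
    = pvFinA l' (((u.map pvTrans).reverse ++ a).take (u.length + a.length - u.count "#")
        ++ List.replicate (s + u.count "#") "#" ++ q)
        (u.length + a.length - u.count "#") := by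
  induction u with
  | nil =>
    intro l' a q s
    simp [List.take_of_length_le]
  | cons c us ih =>
    intro l' a q s
    have hc : c ≠ "*" := fun h => hu (by simp [h])
    have hus : "*" ∉ us := fun h => hu (List.mem_cons_of_mem _ h)
    have hk : us.count "#" ≤ us.length := List.count_le_length
    by_cases hh : c = "#"
    · subst hh
      rw [List.count_cons_self]
      by_cases ha : a = []
      · subst ha
        have step : pvFinA (("#" :: us) ++ l') (([] : List String) ++ List.replicate s "#" ++ q) ([] : List String).length
            = pvFinA (us ++ l') (([] : List String) ++ List.replicate (s+1) "#" ++ q) ([] : List String).length := by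
          simp [pvFinA, List.replicate_succ]
        rw [step, ih hus l' [] q (s+1)]
        have hXr : (("#" :: us).map pvTrans).reverse = (us.map pvTrans).reverse ++ ["."] := by
          simp [pvTrans]
        simp only [hXr, List.append_nil, List.length_cons, List.length_nil, Nat.add_zero]
        have hn : us.length + 1 - (us.count "#" + 1) = us.length - us.count "#" := by omega
        rw [hn, List.take_append_of_le_length (l₂ := ["."])
          (by simp only [List.length_reverse, List.length_map]; omega)]
        have hrep : s + 1 + us.count "#" = s + (us.count "#" + 1) := by omega
        rw [hrep]
      · have hlen : a.length ≠ 0 := by simpa using ha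
        have hset : (a ++ List.replicate s "#" ++ q).set (a.length - 1) "#"
            = a.dropLast ++ List.replicate (s+1) "#" ++ q := by
          rw [List.append_assoc, pv_set_append_left a _ _ _ (by omega), pv_set_last a ha]
          simp [List.replicate_succ]
        have step : pvFinA (("#" :: us) ++ l') (a ++ List.replicate s "#" ++ q) a.length
            = pvFinA (us ++ l') (("." :: a.dropLast) ++ List.replicate (s+1) "#" ++ q) ("." :: a.dropLast).length := by
          simp only [List.cons_append, pvFinA, if_neg hlen]
          rw [hset]
          have h4 : a.length - 1 + 1 = a.length := by omega
          simp [h4]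
        rw [step, ih hus l' ("." :: a.dropLast) q (s+1)]
        have hXr : (("#" :: us).map pvTrans).reverse = (us.map pvTrans).reverse ++ ["."] := by
          simp [pvTrans]
        simp only [hXr, List.length_cons, List.length_dropLast]
        have hn : us.length + (a.length - 1 + 1) - us.count "#"
            = us.length + 1 + a.length - (us.count "#" + 1) := by omega
        rw [hn]
        have hsplit : (((us.map pvTrans).reverse ++ ["."]) ++ a)
            = ((us.map pvTrans).reverse ++ "." :: a.dropLast) ++ [a.getLast ha] := by
          conv_lhs => rw [← List.dropLast_append_getLast ha]
          simp
        rw [hsplit, List.take_append_of_le_length (l₂ := [a.getLast ha])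
          (by simp only [List.length_append, List.length_reverse, List.length_map,
                List.length_cons, List.length_dropLast]; omega)]
        have hrep : s + 1 + us.count "#" = s + (us.count "#" + 1) := by omega
        rw [hrep]
    · rw [List.count_cons_of_ne (by simpa using hh)]
      have step : pvFinA ((c :: us) ++ l') (a ++ List.replicate s "#" ++ q) a.length
          = pvFinA (us ++ l') ((c :: a) ++ List.replicate s "#" ++ q) (c :: a).length := by
        simp [pvFinA, hh, hc]
      rw [step, ih hus l' (c :: a) q s]
      have hXr : ((c :: us).map pvTrans).reverse = (us.map pvTrans).reverse ++ [c] := by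
        simp [pvTrans, hh]
      simp only [hXr, List.length_cons, List.append_assoc, List.singleton_append]
      have hn : us.length + (a.length + 1) - us.count "#"
          = us.length + 1 + a.length - us.count "#" := by omega
      rw [hn]

-- segment-split specification: recursion on the reversed row, splitting at the first '*'
def pvBspec (l : List String) : List String :=
  match h : l.dropWhile (· ≠ "*") with
  | [] => pvFlush (l.takeWhile (· ≠ "*")).reverse
  | _ :: v => pvBspec v ++ "*" :: pvFlush (l.takeWhile (· ≠ "*")).reverse
termination_by l.length
decreasing_by
  have hs : (l.dropWhile (· ≠ "*")).length ≤ l.length := (List.dropWhile_sublist _).length_le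
  rw [h] at hs
  simp at hs
  omega

theorem pvBspec_eq_nil (l : List String) (h : l.dropWhile (· ≠ "*") = []) :
    pvBspec l = pvFlush (l.takeWhile (· ≠ "*")).reverse := by
  rw [pvBspec.eq_def]
  split
  · rfl
  · next x v heq =>
    simp only [ne_eq, decide_not] at h heq
    rw [h] at heq
    cases heq

theorem pvBspec_eq_cons (l v : List String) (x : String) (h : l.dropWhile (· ≠ "*") = x :: v) :
    pvBspec l = pvBspec v ++ "*" :: pvFlush (l.takeWhile (· ≠ "*")).reverse := by
  rw [pvBspec.eq_def]
  split
  · next heq =>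
    simp only [ne_eq, decide_not] at h heq
    rw [h] at heq
    cases heq
  · next x' v' heq =>
    simp only [ne_eq, decide_not] at h heq
    rw [h] at heq
    injection heq with h1 h2
    rw [h2]

theorem pv_dropWhile_head (l : List String) : ∀ (v : List String) (c : String),
    l.dropWhile (· ≠ "*") = c :: v → c = "*" := by
  induction l with
  | nil => intro v c h; simp at h
  | cons x xs ih =>
    intro v c h
    rw [List.dropWhile_cons] at h
    by_cases hx : x = "*"
    · simp [hx] at h
      subst hx
      exact h.1.symm
    · simp [hx] at h
      exact ih v c (by simpa using h)

theorem pv_star_notmem_takeWhile (l : List String) : "*" ∉ l.takeWhile (· ≠ "*") := by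
  intro hm
  have := List.mem_takeWhile_imp hm
  simp at this

theorem pv_flush_eq (u : List String) :
    ((u.map pvTrans).reverse).take (u.length - u.count "#") ++ List.replicate (u.count "#") "#"
      = pvFlush u.reverse := by
  simp only [pvFlush, List.count_reverse, List.length_reverse]
  congr 1
  rw [← List.map_reverse, ← List.map_take]

theorem pv_finA_bspec (n : Nat) : ∀ (l q : List String), l.length ≤ n →
    pvFinA l q 0 = pvBspec l ++ q := by
  induction n with
  | zero =>
    intro l q h
    have hl : l = [] := by cases l <;> simp_all
    subst hl
    simp [pvFinA, pvBspec, pvFlush]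
  | succ N ih =>
    intro l q hlen
    have hu : "*" ∉ l.takeWhile (· ≠ "*") := pv_star_notmem_takeWhile l
    have hsplit : l.takeWhile (· ≠ "*") ++ l.dropWhile (· ≠ "*") = l :=
      List.takeWhile_append_dropWhile
    cases hdrop : l.dropWhile (· ≠ "*") with
    | nil =>
      rw [hdrop, List.append_nil] at hsplit
      rw [pvBspec_eq_nil l hdrop, hsplit]
      have hu' : "*" ∉ l := hsplit ▸ hu
      have hseg := pv_seg l hu' [] [] q 0
      simp only [List.append_nil, List.nil_append, List.replicate_zero, List.length_nil,
        Nat.add_zero, Nat.zero_add] at hseg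
      rw [hseg]
      simp only [pvFinA]
      rw [pv_flush_eq]
    | cons c v =>
      have hc : c = "*" := pv_dropWhile_head l v c hdrop
      subst hc
      rw [hdrop] at hsplit
      rw [pvBspec_eq_cons l v "*" hdrop]
      conv_lhs => rw [← hsplit]
      have hseg := pv_seg (l.takeWhile (· ≠ "*")) hu ("*" :: v) [] q 0
      simp only [List.append_nil, List.nil_append, List.replicate_zero, List.length_nil,
        Nat.add_zero, Nat.zero_add] at hseg
      rw [hseg]
      have hlv : v.length ≤ N := by
        have h1 : ((l.takeWhile (· ≠ "*")) ++ "*" :: v).length = l.length := by rw [hsplit]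
        simp at h1
        omega
      rw [show ∀ (T : List String) (d : Nat), pvFinA ("*" :: v) T d = pvFinA v ("*" :: T) 0 from
        fun T d => by simp [pvFinA]]
      rw [ih v _ hlv, pv_flush_eq, List.append_assoc, List.cons_append]

theorem pv_F1 (y : List String) (hy : "*" ∉ y) : ∀ (o ch : List String),
    y.foldl pvStepB (o, ch) = (o, ch ++ y) := by
  induction y with
  | nil => intro o ch; simp
  | cons c cs ih =>
    intro o ch
    have hc : c ≠ "*" := fun h => hy (by simp [h])
    have hcs : "*" ∉ cs := fun h => hy (List.mem_cons_of_mem _ h)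
    rw [List.foldl_cons]
    simp only [pvStepB, if_neg hc]
    rw [ih hcs o (ch ++ [c])]
    simp

theorem pv_fall_bspec (n : Nat) : ∀ (r : List String), r.length ≤ n →
    pvFall r = pvBspec r.reverse := by
  induction n with
  | zero =>
    intro r h
    have hr : r = [] := by cases r <;> simp_all
    subst hr
    simp [pvFall, pvBspec, pvFlush]
  | succ N ih =>
    intro r hlen
    have hu : "*" ∉ r.reverse.takeWhile (· ≠ "*") := pv_star_notmem_takeWhile r.reverse
    have hsplit : r.reverse.takeWhile (· ≠ "*") ++ r.reverse.dropWhile (· ≠ "*") = r.reverse :=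
      List.takeWhile_append_dropWhile
    cases hdrop : r.reverse.dropWhile (· ≠ "*") with
    | nil =>
      rw [hdrop, List.append_nil] at hsplit
      rw [pvBspec_eq_nil _ hdrop, hsplit, List.reverse_reverse]
      have hrs : "*" ∉ r := fun hm => hu (by rw [hsplit]; exact List.mem_reverse.mpr hm)
      simp only [pvFall]
      rw [pv_F1 r hrs [] []]
      simp only [List.nil_append]
    | cons c v =>
      have hc : c = "*" := pv_dropWhile_head r.reverse v c hdrop
      subst hc
      rw [hdrop] at hsplit
      rw [pvBspec_eq_cons _ v "*" hdrop]
      have hr : r = v.reverse ++ "*" :: (r.reverse.takeWhile (· ≠ "*")).reverse := by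
        have h1 := congrArg List.reverse hsplit
        simpa using h1.symm
      have hy : "*" ∉ (r.reverse.takeWhile (· ≠ "*")).reverse := by
        intro hm; exact hu (List.mem_reverse.mp hm)
      have hlv : v.reverse.length ≤ N := by
        have h1 := congrArg List.length hsplit
        simp at h1
        simp only [List.length_reverse]
        omega
      conv_lhs => rw [pvFall, hr, List.foldl_append, List.foldl_cons]
      have hstar : pvStepB (v.reverse.foldl pvStepB ([], [])) "*"
          = ((v.reverse.foldl pvStepB ([], [])).1 ++ pvFlush (v.reverse.foldl pvStepB ([], [])).2 ++ ["*"], []) := by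
        simp [pvStepB]
      rw [hstar, pv_F1 _ hy]
      dsimp only
      have hfall : (v.reverse.foldl pvStepB ([], [])).1 ++ pvFlush (v.reverse.foldl pvStepB ([], [])).2
          = pvBspec v := by
        have h2 := ih v.reverse hlv
        simp only [pvFall, List.reverse_reverse] at h2
        exact h2
      rw [List.nil_append, List.append_assoc, List.singleton_append, hfall]

theorem pv_getD_append_len' (a : List (List String)) (b : List (List String)) (d : List String) :
    (a ++ b).getD a.length d = b.getD 0 d := by
  induction a with
  | nil => rfl
  | cons x xs ih => simpa using ih

theorem pv_set_append_len' (a b : List (List String)) (i : Nat) (v : List String) :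
    (a ++ b).set (a.length + i) v = a ++ b.set i v := by
  induction a with
  | nil => simp
  | cons x xs ih =>
    have h : (x :: xs).length + i = (xs.length + i) + 1 := by simp; omega
    rw [List.cons_append, h, List.set_cons_succ, ih, List.cons_append]

theorem pv_fold_map (f : List String → List String) :
    ∀ (suf pre : List (List String)),
    (PySem.List.pyRange (pre.length : Int) ((pre.length : Int) + suf.length) 1).foldl
      (fun g row => PySem.List.pySetD g row (f (PySem.List.pyGetD g row []))) (pre ++ suf)
    = pre ++ suf.map f := by
  intro suf
  induction suf with
  | nil =>
    intro pre
    rw [PySem.List.pyRange_one_eq_nil (by simp)]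
    simp
  | cons r rs ih =>
    intro pre
    rw [PySem.List.pyRange_one_cons (by simp only [List.length_cons]; push_cast; omega)]
    rw [List.foldl_cons]
    have hget : PySem.List.pyGetD (pre ++ r :: rs) ((pre.length : Int)) [] = r := by
      rw [PySem.List.pyGetD_natCast, pv_getD_append_len']
      rfl
    have hset : PySem.List.pySetD (pre ++ r :: rs) ((pre.length : Int)) (f r)
        = (pre ++ [f r]) ++ rs := by
      rw [PySem.List.pySetD_natCast]
      have : (pre.length) = pre.length + 0 := by omega
      rw [this, pv_set_append_len']
      simp
    rw [hget, hset]
    have harith : ((pre.length : Int) + 1) = (((pre ++ [f r]).length : Nat) : Int) := by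
      simp
    have harith2 : ((pre.length : Int) + ((r :: rs).length : Nat))
        = (((pre ++ [f r]).length : Nat) : Int) + ((rs.length : Nat) : Int) := by
      simp only [List.length_append, List.length_cons, List.length_nil]
      push_cast
      ring
    rw [harith, harith2, ih (pre ++ [f r])]
    simp

theorem pv_length_flush (c : List String) : (pvFlush c).length = c.length := by
  have hk : c.count "#" ≤ c.length := List.count_le_length
  simp [pvFlush]
  omega

theorem pv_fall_len_aux : ∀ (row o ch : List String),
    ((row.foldl pvStepB (o, ch)).1).length + ((row.foldl pvStepB (o, ch)).2).length
      = o.length + ch.length + row.length := by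
  intro row
  induction row with
  | nil => intro o ch; simp
  | cons c cs ih =>
    intro o ch
    rw [List.foldl_cons]
    by_cases hc : c = "*"
    · subst hc
      simp only [pvStepB, if_pos rfl]
      rw [ih]
      simp [pv_length_flush]
      omega
    · simp only [pvStepB, if_neg hc]
      rw [ih]
      simp
      omega

theorem pv_length_fall (row : List String) : (pvFall row).length = row.length := by
  have h := pv_fall_len_aux row [] []
  simp only [pvFall, List.length_append, pv_length_flush]
  simp at h
  omega

theorem pv_getD_append_left (a b : List String) (i : Nat) (d : String) (h : i < a.length) :
    (a ++ b).getD i d = a.getD i d := by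
  simp [List.getD, List.getElem?_append_left h]

theorem pv_foldmin (m : Nat) : ∀ (rs : List (List String)) (a : Nat), m ≤ a →
    (∀ t ∈ rs, m ≤ t.length) → (a = m ∨ ∃ t ∈ rs, t.length = m) →
    rs.foldl (fun x t => min x t.length) a = m := by
  intro rs
  induction rs with
  | nil =>
    intro a _ _ hd
    rcases hd with h | ⟨t, ht, _⟩
    · exact h
    · simp at ht
  | cons t ts ih =>
    intro a ha hall hd
    rw [List.foldl_cons]
    have hts : ∀ u ∈ ts, m ≤ u.length := fun u hu => hall u (List.mem_cons_of_mem _ hu)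
    have htl : m ≤ t.length := hall t List.mem_cons_self
    rcases hd with h | ⟨u, hu, hul⟩
    · exact ih (min a t.length) (by omega) hts (Or.inl (by omega))
    · rcases List.mem_cons.mp hu with rfl | hu'
      · exact ih (min a u.length) (by omega) hts (Or.inl (by omega))
      · exact ih (min a t.length) (by omega) hts (Or.inr ⟨u, hu', hul⟩)

-- dropping the overflow cells beyond column m changes nothing after the rotation
theorem pv_zip_eq (g : List (List String)) (m : Nat) (hne : g ≠ [])
    (hhead : (g.headD []).length = m)
    (fB : List String → List String) (hfB : ∀ r ∈ g, (fB r).length = m) :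
    pvZipStar ((g.map (fun r => fB r ++ r.drop m)).reverse)
      = pvZipStar ((g.map fB).reverse) := by
  obtain ⟨r0, g', rfl⟩ : ∃ r0 g', g = r0 :: g' := by
    cases g with
    | nil => exact absurd rfl hne
    | cons x xs => exact ⟨x, xs, rfl⟩
  have hr0 : r0.length = m := by simpa using hhead
  -- expose the head of each reversed list
  cases hRA : ((r0 :: g').map (fun r => fB r ++ r.drop m)).reverse with
  | nil => simp at hRA
  | cons A0 As =>
  cases hRB : ((r0 :: g').map fB).reverse with
  | nil => simp at hRB
  | cons B0 Bs =>
  have hAmem : ∀ t ∈ A0 :: As, m ≤ t.length := by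
    intro t ht
    rw [← hRA, List.mem_reverse, List.mem_map] at ht
    obtain ⟨r, hr, rfl⟩ := ht
    simp [hfB r hr]
  have hBmem : ∀ t ∈ B0 :: Bs, t.length = m := by
    intro t ht
    rw [← hRB, List.mem_reverse, List.mem_map] at ht
    obtain ⟨r, hr, rfl⟩ := ht
    exact hfB r hr
  have hwitness : ∃ t ∈ A0 :: As, t.length = m := by
    refine ⟨fB r0 ++ r0.drop m, ?_, ?_⟩
    · rw [← hRA, List.mem_reverse, List.mem_map]
      exact ⟨r0, List.mem_cons_self, rfl⟩
    · simp [hfB r0 List.mem_cons_self, hr0]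
  have hkA : As.foldl (fun x t => min x t.length) A0.length = m := by
    apply pv_foldmin m As A0.length (hAmem A0 List.mem_cons_self)
      (fun t ht => hAmem t (List.mem_cons_of_mem _ ht))
    rcases hwitness with ⟨t, ht, htl⟩
    rcases List.mem_cons.mp ht with rfl | ht'
    · exact Or.inl htl
    · exact Or.inr ⟨t, ht', htl⟩
  have hkB : Bs.foldl (fun x t => min x t.length) B0.length = m := by
    apply pv_foldmin m Bs B0.length (by rw [hBmem B0 List.mem_cons_self])
      (fun t ht => by rw [hBmem t (List.mem_cons_of_mem _ ht)])
    exact Or.inl (hBmem B0 List.mem_cons_self)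
  simp only [pvZipStar]
  rw [hkA, hkB]
  apply List.map_congr_left
  intro i hi
  rw [List.mem_range] at hi
  rw [← hRA, ← hRB, List.map_reverse, List.map_reverse, List.map_map, List.map_map]
  congr 1
  apply List.map_congr_left
  intro r hr
  simp only [Function.comp_apply]
  exact pv_getD_append_left (fB r) (r.drop m) i "" (by rw [hfB r hr]; omega)

-- ===== VERDICT (by name: the statement is the Claim_ definition above) =====
theorem rotateTheBox_spec : Claim_equal_rotateTheBox := by
  intro g _ hpre
  obtain ⟨hne, hall⟩ := hpre
  show rotateTheBox g = rotateTheBox_alt g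
  dsimp only [rotateTheBox, rotateTheBox_alt]
  have hG : List.foldl
      (fun gg row => PySem.List.pySetD gg row
        (((PySem.List.pyRange (((g.headD []).length : Int) - 1) (-1) (-1)).foldl pvStepA
          (PySem.List.pyGetD gg row [], ((g.headD []).length : Int) - 1)).1))
      g (PySem.List.pyRange 0 (g.length : Int) 1)
      = g.map (fun r => (((PySem.List.pyRange (((g.headD []).length : Int) - 1) (-1) (-1)).foldl pvStepA
          (r, ((g.headD []).length : Int) - 1)).1)) := by
    have hfold := pv_fold_map
      (fun r => (((PySem.List.pyRange (((g.headD []).length : Int) - 1) (-1) (-1)).foldl pvStepA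
        (r, ((g.headD []).length : Int) - 1)).1)) g []
    simp only [List.length_nil, Nat.cast_zero, List.nil_append, Int.zero_add] at hfold
    exact hfold
  rw [hG]
  have hmap : g.map (fun r => (((PySem.List.pyRange (((g.headD []).length : Int) - 1) (-1) (-1)).foldl pvStepA
      (r, ((g.headD []).length : Int) - 1)).1))
      = g.map (fun r => pvFall (r.take (g.headD []).length) ++ r.drop (g.headD []).length) := by
    apply List.map_congr_left
    intro r hr
    have hge : (g.headD []).length ≤ r.length := hall r hr
    have hlt : (r.take (g.headD []).length).length = (g.headD []).length := by
      simp [List.length_take]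
      simpa [List.headD_eq_head?_getD] using hge
    have h1 := pv_foldA_finA (r.take (g.headD []).length).reverse (r.drop (g.headD []).length) 0 (by simp)
    simp only [List.reverse_reverse, List.length_reverse, Nat.cast_zero, Int.add_zero] at h1
    rw [hlt, List.take_append_drop] at h1
    rw [h1, pv_finA_bspec ((r.take (g.headD []).length).reverse.length) _ _ (le_refl _)]
    rw [← pv_fall_bspec ((r.take (g.headD []).length).length) _ (le_refl _)]
  rw [hmap]
  exact pv_zip_eq g (g.headD []).length hne rfl
    (fun r => pvFall (r.take (g.headD []).length))
    (fun r hr => by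
      rw [pv_length_fall]
      simp [List.length_take]
      simpa [List.headD_eq_head?_getD] using hall r hr)
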